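-- pv_equiv track=rewrite | github.com/zhuodiliu/Sapientia | preparation.py | searchTime
-- ===== SOURCE A (Python) =====
-- def searchTime(table, module):
--     course = ''
--     for line in table:
--         if line[1] == module:
--             course = line[0]
--         if line[3].find(module)!=-1:
--             if line[4]!='null':
--                 return line[4]
--             else:
--                 return searchTime(table, line[1])
--     return 'null'
-- ===== SOURCE B (Python) =====
-- def searchTime(table, module):
--     current = module
--     while True:
--         hit = next((line for line in table if line[3].find(current) != -1), None)
--         if hit is None:
--             return 'null'
--         if hit[4] != 'null':
--             return hit[4]
--         current = hit[1]
-- ===== Notes on version B (the rewrite author's own statement) =====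
-- stated objective: simpler
-- what changed: Replaced the tail recursion by an iterative while-loop over a 'current' module variable, with the row scan expressed as a first-match lookup (next/generator), and dropped the dead 'course' accumulator.
-- outside the precondition, e.g. on searchTime([['C', 'm', 'x', 'q', 'T'], ['a']], 'q'): A returns 'T', B returns 'T'
import Mathlib
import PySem

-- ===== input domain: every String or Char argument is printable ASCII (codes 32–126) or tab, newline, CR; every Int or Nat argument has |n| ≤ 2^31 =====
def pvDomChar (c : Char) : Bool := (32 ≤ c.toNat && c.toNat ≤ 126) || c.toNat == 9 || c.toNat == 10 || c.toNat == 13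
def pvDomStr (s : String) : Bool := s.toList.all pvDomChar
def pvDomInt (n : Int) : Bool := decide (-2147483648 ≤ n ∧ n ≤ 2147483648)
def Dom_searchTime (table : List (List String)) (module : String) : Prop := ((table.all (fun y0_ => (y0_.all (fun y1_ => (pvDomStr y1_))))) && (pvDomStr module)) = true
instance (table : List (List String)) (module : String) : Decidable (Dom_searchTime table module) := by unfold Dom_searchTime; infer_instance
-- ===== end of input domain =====

-- B replaces A's tail recursion by an iterative loop with a first-match scan and drops A's dead 'course' accumulator (objective: simpler).


-- ===== PORT A =====
-- fuel makes the recursion total; inside Pre_ (no lasso) the chain from `module` never revisits a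
-- value, so it makes at most (number of 'null' rows) ≤ table.length recursive steps and the
-- fuel-0 fallback is never reached there.
def searchTimeA (table : List (List String)) (fuel : Nat) (rows : List (List String))
    (module : String) (course : String) : String :=
  match rows with
  | [] => "null"
  | r :: rs =>
    -- course := line[0] if line[1] == module (dead state, kept from A)
    let course' := if r.getD 1 "" = module then r.getD 0 "" else course
    if PySem.Str.find (r.getD 3 "") module ≠ -1 then
      if r.getD 4 "" ≠ "null" then r.getD 4 ""
      else
        match fuel with
        | 0 => "null"
        | f + 1 => searchTimeA table f table (r.getD 1 "") ""
    else searchTimeA table fuel rs module course'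
termination_by (fuel, rows.length)

def searchTime (table : List (List String)) (module : String) : String :=
  searchTimeA table (table.length + 1) table module ""

-- ===== PORT B =====
def searchTime_altLoop (table : List (List String)) (fuel : Nat) (current : String) : String :=
  match table.find? (fun r => PySem.Str.find (r.getD 3 "") current != -1) with
  | none => "null"
  | some hit =>
    if hit.getD 4 "" ≠ "null" then hit.getD 4 ""
    else
      match fuel with
      | 0 => "null"
      | f + 1 => searchTime_altLoop table f (hit.getD 1 "")

def searchTime_alt (table : List (List String)) (module : String) : String :=
  searchTime_altLoop table (table.length + 1) module

-- ===== PRECONDITION & SPEC =====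
-- one step of the chain: the first row whose column 3 contains `s` sends `s` to its column 1
-- when its column 4 is 'null' (otherwise, or with no such row, the search stops)
def nextVal (table : List (List String)) (s : String) : Option String :=
  match table.find? (fun r => PySem.Str.find (r.getD 3 "") s != -1) with
  | some hit => if hit.getD 4 "" = "null" then some (hit.getD 1 "") else none
  | none => none

-- the values a chain can visit after its start: column 1 of the rows whose column 4 is 'null'
def nullTargets (table : List (List String)) : List String :=
  table.filterMap (fun r => if r.getD 4 "" = "null" then some (r.getD 1 "") else none)

-- consecutive values of a candidate chain are linked by nextVal
def linksOk (table : List (List String)) : List String → Bool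
  | [] => true
  | [_] => true
  | a :: b :: rest => (nextVal table a == some b) && linksOk table (b :: rest)

-- all ways of selecting a subset of a list (helper for Diverges; plain structural recursion)
def pvSublists : List String → List (List String)
  | [] => [[]]
  | a :: xs => pvSublists xs ++ (pvSublists xs).map (a :: ·)

-- all positions at which a value can be inserted into a list (helper for pvPerms)
def pvInserts (a : String) : List String → List (List String)
  | [] => [[a]]
  | b :: xs => (a :: b :: xs) :: (pvInserts a xs).map (b :: ·)

-- all orderings of a list (helper for Diverges; plain structural recursion)
def pvPerms : List String → List (List String)
  | [] => [[]]
  | a :: xs => (pvPerms xs).flatMap (pvInserts a)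

-- a 'lasso': a chain of values starting at `module`, linked by nextVal, whose last value steps
-- back into the chain — exactly the inputs on which A's recursion never terminates
def Diverges (table : List (List String)) (module : String) : Prop :=
  ∃ l ∈ ((pvSublists ((module :: nullTargets table).dedup)).flatMap pvPerms),
    l.head? = some module ∧
    linksOk table l = true ∧
    ∃ v ∈ l, l.getLast?.bind (nextVal table) = some v

-- Pre_ excludes (i) tables with a row too short for Python's indexing — shorter than 4 entries,
-- or shorter than 5 when its column 3 contains a chain value so its column 4 is read — on which
-- A can raise IndexError, and (ii) inputs whose chain of modules enters a cycle (a lasso), on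
-- which A recurses forever and raises RecursionError while B's loop never returns; every
-- terminating chain, of any depth, is inside Pre_.  The equivalence proof holds for the ports
-- unconditionally (both use the same fuel), so Pre_'s only role is to mark where Python A raises.
def Pre_searchTime (table : List (List String)) (module : String) : Prop :=
  (∀ r ∈ table, 4 ≤ r.length ∧
    ((∃ c ∈ (module :: nullTargets table), PySem.Str.find (r.getD 3 "") c ≠ -1) → 5 ≤ r.length)) ∧
  ¬ Diverges table module
instance (table : List (List String)) (module : String) : Decidable (Pre_searchTime table module) := by
  unfold Pre_searchTime Diverges; infer_instance

def pvWitness_searchTime : List (List String) × String :=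
  ([["C1", "m", "d", "q", "9am"]], "m")

def Spec_searchTime (table : List (List String)) (module : String) (out : String) : Prop := out = searchTime_alt table module
instance (table : List (List String)) (module : String) (out : String) : Decidable (Spec_searchTime table module out) := by unfold Spec_searchTime; infer_instance

-- ===== CLAIM (what is proved, stated in full; the proofs are below) =====
def Claim_equal_searchTime : Prop := ∀ (table : List (List String)) (module : String), Dom_searchTime table module → Pre_searchTime table module → Spec_searchTime table module (searchTime table module)

-- ===== LEMMAS AND PROOFS =====

-- A's scan over the remaining rows is a first-match lookup; the dead 'course' state is irrelevant.
theorem searchTimeA_eq_find (table : List (List String)) (fuel : Nat) :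
    ∀ (rows : List (List String)) (module course : String),
      searchTimeA table fuel rows module course =
        match rows.find? (fun r => PySem.Str.find (r.getD 3 "") module != -1) with
        | none => "null"
        | some hit =>
          if hit.getD 4 "" ≠ "null" then hit.getD 4 ""
          else
            match fuel with
            | 0 => "null"
            | f + 1 => searchTimeA table f table (hit.getD 1 "") "" := by
  intro rows
  induction rows with
  | nil => intro module course; simp [searchTimeA]
  | cons r rs ih =>
    intro module course
    rw [searchTimeA.eq_def, List.find?_cons]
    cases hb : PySem.Str.find (r.getD 3 "") module != -1 with
    | false =>
      have h : PySem.Str.find (r.getD 3 "") module = -1 := by simpa using hb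
      simp only [hb]
      rw [if_neg (not_not_intro h)]
      exact ih module _
    | true =>
      have h : PySem.Str.find (r.getD 3 "") module ≠ -1 := by simpa using hb
      simp only [hb]
      rw [if_pos h]

-- main equivalence: with equal fuel the two loops agree on every input
theorem searchTimeA_eq_B (table : List (List String)) :
    ∀ (fuel : Nat) (module : String),
      searchTimeA table fuel table module "" = searchTime_altLoop table fuel module := by
  intro fuel
  induction fuel with
  | zero =>
    intro module
    rw [searchTimeA_eq_find, searchTime_altLoop]
  | succ f ih =>
    intro module
    rw [searchTimeA_eq_find, searchTime_altLoop]
    cases hfind : table.find? (fun r => PySem.Str.find (r.getD 3 "") module != -1) with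
    | none => rfl
    | some hit =>
      by_cases h : hit[4]?.getD "" = "null"
      · simp [List.getD, h, ih]
      · simp [List.getD, h]

-- ===== VERDICT (by name: the statement is the Claim_ definition above) =====
theorem searchTime_spec : Claim_equal_searchTime := by
  intro table module _ _
  unfold Spec_searchTime searchTime searchTime_alt
  exact searchTimeA_eq_B table (table.length + 1) module
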